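-- pv_equiv track=rewrite | github.com/samdot07/Computer-Science-and-Engineering-Course-6-3 | 6.100L Introduction To CS And Programming Using Python/lecture code/mit6_100l_f22_lec14_code.py | is_inverse
-- ===== SOURCE A (Python) =====
-- def is_inverse(d1, d2):
--     '''
--     - d1 and d2 are dicts.
--     ---
--     #### Returns:
--         True if d1's keys are values in d2 and d1's values are keys in d2.
--     ---
--     #### Note:
--     Assume values of d1 and d2 are unique and immutable.
--     '''
--
--     # Iterate through each key-value pair in the dictionary 'd1'
--     for k1, v1 in d1.items():
--         if k1 not in d2.values() or v1 not in d2.keys():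
--             return False
--
--     # Iterate through each key-value pair in the dictionary 'd2'
--     for k2, v2 in d2.items():
--         if k2 not in d1.values() or v2 not in d1.keys():
--             return False
--
--     return True
-- ===== SOURCE B (Python) =====
-- def is_inverse(d1, d2):
--     return set(d1.keys()) == set(d2.values()) and set(d1.values()) == set(d2.keys())
-- ===== Notes on version B (the rewrite author's own statement) =====
-- stated objective: simpler
-- what changed: Replaces A's two early-exit loops of per-pair membership tests with building the four key/value sets once and comparing them as whole sets (preserving A's membership-only semantics, not a true-inverse check).
import Mathlib
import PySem

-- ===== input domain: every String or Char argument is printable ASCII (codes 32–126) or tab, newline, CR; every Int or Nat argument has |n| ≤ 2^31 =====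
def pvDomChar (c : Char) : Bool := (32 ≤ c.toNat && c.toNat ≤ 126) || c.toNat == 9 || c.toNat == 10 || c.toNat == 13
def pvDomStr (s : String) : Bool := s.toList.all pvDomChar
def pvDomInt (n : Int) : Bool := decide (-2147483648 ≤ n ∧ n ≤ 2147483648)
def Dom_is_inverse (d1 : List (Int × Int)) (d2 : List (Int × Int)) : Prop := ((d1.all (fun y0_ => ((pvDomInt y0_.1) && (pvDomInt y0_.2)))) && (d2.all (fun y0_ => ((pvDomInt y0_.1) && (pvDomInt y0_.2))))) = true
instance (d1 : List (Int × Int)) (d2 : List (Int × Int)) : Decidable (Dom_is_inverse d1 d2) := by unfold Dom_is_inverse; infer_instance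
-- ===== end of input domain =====

-- Simpler B: A's two early-exit loops of per-pair membership tests become building the
-- four key/value sets once and comparing them as whole sets (same membership-only semantics).
-- ===== PORT A =====
-- the for-loop over d.items() with early 'return False'
def isInvLoopA (items : List (Int × Int)) (vals : List Int) (keys : List Int) : Bool :=
  match items with
  | [] => true
  | (k, v) :: rest =>
    if !(vals.contains k) || !(keys.contains v) then false
    else isInvLoopA rest vals keys

def is_inverse (d1 : List (Int × Int)) (d2 : List (Int × Int)) : Bool :=
  let dd1 := PySem.Dict.ofList d1
  let dd2 := PySem.Dict.ofList d2
  if !(isInvLoopA dd1.items dd2.values dd2.keys) then false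
  else if !(isInvLoopA dd2.items dd1.values dd1.keys) then false
  else true

-- ===== PORT B =====
def is_inverse_alt (d1 : List (Int × Int)) (d2 : List (Int × Int)) : Bool :=
  let dd1 := PySem.Dict.ofList d1
  let dd2 := PySem.Dict.ofList d2
  PySem.Set.equal (PySem.Set.ofList dd1.keys) (PySem.Set.ofList dd2.values) &&
  PySem.Set.equal (PySem.Set.ofList dd1.values) (PySem.Set.ofList dd2.keys)

-- ===== PRECONDITION & SPEC =====
def Spec_is_inverse (d1 : List (Int × Int)) (d2 : List (Int × Int)) (out : Bool) : Prop := out = is_inverse_alt d1 d2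
instance (d1 : List (Int × Int)) (d2 : List (Int × Int)) (out : Bool) : Decidable (Spec_is_inverse d1 d2 out) := by unfold Spec_is_inverse; infer_instance

-- ===== CLAIM (what is proved, stated in full; the proofs are below) =====
def Claim_equal_is_inverse : Prop := ∀ (d1 : List (Int × Int)) (d2 : List (Int × Int)), Dom_is_inverse d1 d2 → Spec_is_inverse d1 d2 (is_inverse d1 d2)

-- ===== LEMMAS AND PROOFS =====

-- ===== VERDICT (by name: the statement is the Claim_ definition above) =====
lemma isInvLoopA_iff (items : List (Int × Int)) (vals keys : List Int) :
    isInvLoopA items vals keys = true ↔ ∀ p ∈ items, p.1 ∈ vals ∧ p.2 ∈ keys := by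
  induction items with
  | nil => simp [isInvLoopA]
  | cons p rest ih =>
    obtain ⟨k, v⟩ := p
    simp only [isInvLoopA, List.mem_cons]
    by_cases hk : k ∈ vals <;> by_cases hv : v ∈ keys <;>
      simp [hk, hv, ih]

-- ===== VERDICT (by name: the statement is the Claim_ definition above) =====
theorem is_inverse_spec : Claim_equal_is_inverse := by
  intro d1 d2 _
  unfold Spec_is_inverse is_inverse is_inverse_alt
  set dd1 := PySem.Dict.ofList d1
  set dd2 := PySem.Dict.ofList d2
  have hA : ∀ b1 b2 : Bool, (if !b1 then false else if !b2 then false else true) = (b1 && b2) := by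
    decide
  rw [hA]
  rw [Bool.eq_iff_iff]
  simp only [Bool.and_eq_true, isInvLoopA_iff, PySem.Set.equal_iff, PySem.Set.mem_ofList]
  constructor
  · rintro ⟨h1, h2⟩
    have k1v2 : ∀ x ∈ dd1.keys, x ∈ dd2.values := by
      intro x hx
      obtain ⟨p, hp, rfl⟩ := List.mem_map.1 hx
      exact (h1 p hp).1
    have v1k2 : ∀ x ∈ dd1.values, x ∈ dd2.keys := by
      intro x hx
      obtain ⟨p, hp, rfl⟩ := List.mem_map.1 hx
      exact (h1 p hp).2
    have k2v1 : ∀ x ∈ dd2.keys, x ∈ dd1.values := by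
      intro x hx
      obtain ⟨p, hp, rfl⟩ := List.mem_map.1 hx
      exact (h2 p hp).1
    have v2k1 : ∀ x ∈ dd2.values, x ∈ dd1.keys := by
      intro x hx
      obtain ⟨p, hp, rfl⟩ := List.mem_map.1 hx
      exact (h2 p hp).2
    exact ⟨fun x => ⟨fun h => k1v2 x h, fun h => v2k1 x h⟩,
           fun x => ⟨fun h => v1k2 x h, fun h => k2v1 x h⟩⟩
  · rintro ⟨hkv, hvk⟩
    refine ⟨fun p hp => ⟨?_, ?_⟩, fun p hp => ⟨?_, ?_⟩⟩
    · exact (hkv p.1).1 (List.mem_map.2 ⟨p, hp, rfl⟩)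
    · exact (hvk p.2).1 (List.mem_map.2 ⟨p, hp, rfl⟩)
    · exact (hvk p.1).2 (List.mem_map.2 ⟨p, hp, rfl⟩)
    · exact (hkv p.2).2 (List.mem_map.2 ⟨p, hp, rfl⟩)
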